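-- pv_equiv track=rewrite | github.com/cptn-neemo/Word-Search-Shortcut | main.py | trBL_diagonal_check
-- ===== SOURCE A (Python) =====
-- def diagonal_check(word,board):
--
--     word_place = 0
--
--     c = 0
--     r = 0
--     for row in range(len(board)):
--         for col in range(len(board[row])):
--             word_place = 0
--             if word[word_place] == board[row][col] or word[word_place].lower() == board[row][col].lower():
--                 r = row
--                 c = col
--
--                 for let in word:
--                     try:
--                         if word[word_place] == board[r][c] or word[word_place] == board[r][c].lower():
--                             c += 1
--                             r += 1
--                             word_place += 1
--                         else: break
--                     except:
--                         break
--                 else: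
--                     c = col
--                     r = row
--
--                     for let in range(len(word)):
--                         board[r][c] = word[let].upper()
--                         r += 1
--                         c += 1
--
--     return board
--
-- def trBL_diagonal_check(word,board):
--     new_board = board
--
--     for row in range(len(new_board)):
--         new_board[row] = new_board[row][::-1]
--
--     diagonal_check(word,new_board)
--
--     for row in range(len(new_board)):
--         new_board[row] = new_board[row][::-1]
--
--     return board
-- ===== SOURCE B (Python) =====
-- # B: scans the top-right->bottom-left diagonal directly on the original board
-- # (no row reversals): for each row, offsets from the right edge; a single walk
-- # with A's asymmetric match test, writing uppercased letters on a full match.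
-- # Like A, mutates `board` in place and returns it.
-- def trBL_diagonal_check(word, board):
--     for row in range(len(board)):
--         for j in range(len(board[row])):  # j = offset from the right edge, rightmost first
--             if _walk(word, board, row, j):
--                 r, k = row, j
--                 for i in range(len(word)):
--                     rowlist = board[r]
--                     rowlist[len(rowlist) - 1 - k] = word[i].upper()
--                     r += 1
--                     k += 1
--     return board
--
-- def _walk(word, board, r, k):
--     for ch in word:
--         if r >= len(board):
--             return False
--         rowlist = board[r]
--         c = len(rowlist) - 1 - k
--         if c < 0:
--             return False
--         cell = rowlist[c]
--         if not (ch == cell or ch == cell.lower()):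
--             return False
--         r += 1
--         k += 1
--     return True
-- ===== Notes on version B (the rewrite author's own statement) =====
-- stated objective: simpler
-- what changed: B drops A's reverse-every-row / scan / reverse-back round trip and scans the top-right-to-bottom-left diagonals directly on the original board, addressing cells by their offset from the right edge and using one walk pass (the seed test is subsumed by the walk's first step).
import Mathlib
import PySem

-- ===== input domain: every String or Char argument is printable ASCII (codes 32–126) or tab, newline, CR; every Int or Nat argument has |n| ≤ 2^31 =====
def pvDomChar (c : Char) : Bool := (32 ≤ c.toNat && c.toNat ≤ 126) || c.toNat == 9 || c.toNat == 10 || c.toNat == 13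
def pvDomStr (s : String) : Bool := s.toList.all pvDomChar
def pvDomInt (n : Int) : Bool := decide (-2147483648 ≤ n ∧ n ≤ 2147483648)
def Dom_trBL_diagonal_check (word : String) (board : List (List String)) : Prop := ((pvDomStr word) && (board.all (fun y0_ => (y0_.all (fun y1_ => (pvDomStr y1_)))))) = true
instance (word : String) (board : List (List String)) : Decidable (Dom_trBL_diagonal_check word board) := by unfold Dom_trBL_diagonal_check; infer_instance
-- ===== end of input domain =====

-- B scans the top-right→bottom-left diagonal directly on the original board (offsets from the
-- right edge) instead of A's reverse-every-row / top-left-diagonal-scan / reverse-back; the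
-- equivalence proved is about the RETURN value (both Pythons also mutate `board` in place).

-- the walk test `word[i] == cell or word[i] == cell.lower()`, literal in both Pythons
def pvMatch (ch : Char) (cell : String) : Bool :=
  (String.singleton ch == cell) || (String.singleton ch == PySem.Str.lower cell)

-- ===== PORT A =====
-- seed test `word[0] == cell or word[0].lower() == cell.lower()`
def pvSeed (ch : Char) (cell : String) : Bool :=
  (String.singleton ch == cell) || (PySem.Str.lower (String.singleton ch) == PySem.Str.lower cell)

-- the `for let in word: try: … except: break / else:` walk; the `except` catches exactly the
-- IndexError of board[r][c], i.e. the `none` of the nonnegative-index lookups below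
def pvWalkA : List Char → List (List String) → Nat → Nat → Bool
  | [], _, _, _ => true
  | ch :: ws, b, r, c =>
    match (b[r]?).bind (fun row => row[c]?) with
    | none => false
    | some cell => if pvMatch ch cell then pvWalkA ws b (r + 1) (c + 1) else false

-- the write-back loop `board[r][c] = word[let].upper(); r += 1; c += 1` (indices in range there)
def pvWriteA : List Char → List (List String) → Nat → Nat → List (List String)
  | [], b, _, _ => b
  | ch :: ws, b, r, c =>
    let row := (b[r]?).getD []
    pvWriteA ws (b.set r (row.set c (PySem.Str.upper (String.singleton ch)))) (r + 1) (c + 1)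

-- body of the two nested scan loops, at cell (row, col)
def pvStepA (w : List Char) (b : List (List String)) (row col : Nat) : List (List String) :=
  match w with
  | [] => b  -- word[0] raises IndexError here in Python: excluded by Pre_
  | ch :: _ =>
    match (b[row]?).bind (fun rw => rw[col]?) with
    | none => b  -- unreachable: (row, col) is generated in range by the scan
    | some cell =>
      if pvSeed ch cell then
        (if pvWalkA w b row col then pvWriteA w b row col else b)
      else b

-- diagonal_check: row-major scan; inner range re-reads len(board[row]) from the current state
def pvDiagonalCheck (w : List Char) (b0 : List (List String)) : List (List String) :=
  (List.range b0.length).foldl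
    (fun b row =>
      (List.range ((b[row]?).getD []).length).foldl (fun b' col => pvStepA w b' row col) b)
    b0

-- trBL_diagonal_check: reverse every row (row[::-1]), run diagonal_check, reverse every row back
def trBL_diagonal_check (word : String) (board : List (List String)) : List (List String) :=
  (pvDiagonalCheck word.toList (board.map List.reverse)).map List.reverse

-- ===== PORT B =====
-- _walk: direct diagonal walk; k is the offset from the right edge, c the real column
def pvWalkB : List Char → List (List String) → Nat → Nat → Bool
  | [], _, _, _ => true
  | ch :: ws, b, r, k =>
    match b[r]? with
    | none => false  -- r >= len(board)
    | some row =>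
      let c : Int := (row.length : Int) - 1 - (k : Int)
      if c < 0 then false
      else
        match row[c.toNat]? with
        | none => false  -- unreachable: 0 ≤ c < len(row)
        | some cell => if pvMatch ch cell then pvWalkB ws b (r + 1) (k + 1) else false

-- the write-back loop `rowlist[len(rowlist) - 1 - k] = word[i].upper()` (indices in range there)
def pvWriteB : List Char → List (List String) → Nat → Nat → List (List String)
  | [], b, _, _ => b
  | ch :: ws, b, r, k =>
    let row := (b[r]?).getD []
    pvWriteB ws (b.set r (row.set (row.length - 1 - k) (PySem.Str.upper (String.singleton ch))))
      (r + 1) (k + 1)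

def trBL_diagonal_check_alt (word : String) (board : List (List String)) : List (List String) :=
  (List.range board.length).foldl
    (fun b row =>
      (List.range ((b[row]?).getD []).length).foldl
        (fun b' j => if pvWalkB word.toList b' row j then pvWriteB word.toList b' row j else b')
        b)
    board

-- ===== PRECONDITION & SPEC =====
-- Pre_ excludes only the inputs where Python A raises: word == '' with at least one nonempty
-- row makes `word[word_place]` raise IndexError in the seed test.
def Pre_trBL_diagonal_check (word : String) (board : List (List String)) : Prop :=
  word ≠ "" ∨ ∀ row ∈ board, row = []
instance (word : String) (board : List (List String)) : Decidable (Pre_trBL_diagonal_check word board) := by unfold Pre_trBL_diagonal_check; infer_instance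

def pvWitness_trBL_diagonal_check : String × List (List String) := ("ab", [["b", "a"], ["x", "b"]])

def Spec_trBL_diagonal_check (word : String) (board : List (List String)) (out : List (List String)) : Prop := out = trBL_diagonal_check_alt word board
instance (word : String) (board : List (List String)) (out : List (List String)) : Decidable (Spec_trBL_diagonal_check word board out) := by unfold Spec_trBL_diagonal_check; infer_instance

-- ===== CLAIM (what is proved, stated in full; the proofs are below) =====
def Claim_equal_trBL_diagonal_check : Prop := ∀ (word : String) (board : List (List String)), Dom_trBL_diagonal_check word board → Pre_trBL_diagonal_check word board → Spec_trBL_diagonal_check word board (trBL_diagonal_check word board)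


-- ===== LEMMAS AND PROOFS =====

-- lowering a character twice is lowering it once
theorem pvLowerChar_idem (c : Char) :
    PySem.Chars.lowerChar (PySem.Chars.lowerChar c) = PySem.Chars.lowerChar c := by
  unfold PySem.Chars.lowerChar PySem.Chars.isupper
  by_cases h : ('A' ≤ c ∧ c ≤ 'Z')
  · have hlo : (65 : Nat) ≤ c.toNat := h.1
    have hhi : c.toNat ≤ 90 := h.2
    have hv : (c.toNat + 32).isValidChar := by left; omega
    have ht : (Char.ofNat (c.toNat + 32)).toNat = c.toNat + 32 := by
      rw [Char.toNat_ofNat, if_pos hv]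
    have hnot : ¬ (Char.ofNat (c.toNat + 32) ≤ 'Z') := by
      intro hc
      have hc' : (Char.ofNat (c.toNat + 32)).toNat ≤ 90 := hc
      omega
    simp [h.1, h.2, hnot]
  · rcases not_and_or.mp h with hx | hx <;> simp [hx]

theorem pvLower_idem (s : String) :
    PySem.Str.lower (PySem.Str.lower s) = PySem.Str.lower s := by
  simp only [PySem.Str.lower, String.toList_ofList, PySem.Chars.lower, List.map_map]
  congr 1
  apply List.map_congr_left
  intro c _
  exact pvLowerChar_idem c

-- the walk test at step 0 implies A's seed test
theorem pvMatch_imp_seed (ch : Char) (cell : String) (h : pvMatch ch cell = true) :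
    pvSeed ch cell = true := by
  unfold pvMatch at h
  unfold pvSeed
  rcases Bool.or_eq_true_iff.mp h with h1 | h1
  · exact Bool.or_eq_true_iff.mpr (Or.inl h1)
  · refine Bool.or_eq_true_iff.mpr (Or.inr ?_)
    have he : String.singleton ch = PySem.Str.lower cell := beq_iff_eq.mp h1
    rw [he, pvLower_idem]
    simp

-- the reversed-row walk of A is B's direct walk
theorem pvWalkA_rev (ws : List Char) :
    ∀ (b : List (List String)) (r k : Nat),
      pvWalkA ws (b.map List.reverse) r k = pvWalkB ws b r k := by
  induction ws with
  | nil => intro b r k; rfl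
  | cons ch ws ih =>
    intro b r k
    simp only [pvWalkA, pvWalkB, List.getElem?_map]
    cases hb : b[r]? with
    | none => rfl
    | some row =>
      simp only [Option.map_some, Option.bind_some]
      by_cases hk : k < row.length
      · have hc0 : ¬ ((row.length : Int) - 1 - (k : Int) < 0) := by omega
        have hct : ((row.length : Int) - 1 - (k : Int)).toNat = row.length - 1 - k := by omega
        rw [List.getElem?_reverse hk]
        simp only [hc0, if_false, hct]
        cases hcell : row[row.length - 1 - k]? with
        | none =>
          exfalso
          rw [List.getElem?_eq_none_iff] at hcell
          omega
        | some cell =>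
          by_cases hm : pvMatch ch cell = true
          · simp [hm, ih]
          · simp [hm]
      · have h1 : row.reverse[k]? = none := by
          rw [List.getElem?_eq_none_iff]
          simp only [List.length_reverse]
          omega
        have hc0 : ((row.length : Int) - 1 - (k : Int) < 0) := by omega
        simp [h1, hc0]

-- positions (and only positions) a write needs: row lengths along the diagonal
def pvValid : List Char → List Nat → Nat → Nat → Prop
  | [], _, _, _ => True
  | _ :: ws, ns, r, k =>
    match ns[r]? with
    | none => False
    | some n => k < n ∧ pvValid ws ns (r + 1) (k + 1)

-- a successful B-walk certifies the positions
theorem pvWalkB_valid (ws : List Char) :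
    ∀ (b : List (List String)) (r k : Nat),
      pvWalkB ws b r k = true → pvValid ws (b.map List.length) r k := by
  induction ws with
  | nil => intro b r k _; trivial
  | cons ch ws ih =>
    intro b r k h
    simp only [pvWalkB] at h
    cases hb : b[r]? with
    | none => rw [hb] at h; exact absurd h (by simp)
    | some row =>
      rw [hb] at h
      simp only at h
      by_cases hc : ((row.length : Int) - 1 - (k : Int) < 0)
      · rw [if_pos hc] at h; exact absurd h (by simp)
      · rw [if_neg hc] at h
        cases hcell : row[((row.length : Int) - 1 - (k : Int)).toNat]? with
        | none => rw [hcell] at h; exact absurd h (by simp)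
        | some cell =>
          rw [hcell] at h
          dsimp only at h
          by_cases hm : pvMatch ch cell = true
          · rw [if_pos hm] at h
            simp only [pvValid, List.getElem?_map, hb, Option.map_some]
            exact ⟨by omega, ih _ _ _ h⟩
          · rw [if_neg hm] at h; exact absurd h (by simp)

-- reversing a list after setting i is setting len-1-i after reversing
theorem pvReverse_set (l : List String) (i : Nat) (a : String) (h : i < l.length) :
    (l.set i a).reverse = l.reverse.set (l.length - 1 - i) a := by
  apply List.ext_getElem?
  intro j
  by_cases hj : j < l.length
  · rw [List.getElem?_reverse (by simpa using hj)]
    simp only [List.length_set, List.getElem?_set, List.length_reverse]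
    by_cases hij : i = l.length - 1 - j
    · rw [if_pos hij, if_pos (show l.length - 1 - i = j by omega), if_pos h, if_pos (by omega)]
    · rw [if_neg hij, if_neg (show ¬ (l.length - 1 - i = j) by omega), List.getElem?_reverse hj]
  · have h1 : ((l.set i a).reverse)[j]? = none := by
      rw [List.getElem?_eq_none_iff]; simp; omega
    have h2 : (l.reverse.set (l.length - 1 - i) a)[j]? = none := by
      rw [List.getElem?_eq_none_iff]; simp; omega
    rw [h1, h2]

-- under valid positions, A's write on the reversed board is the reversal of B's write
theorem pvWriteA_rev (ws : List Char) :
    ∀ (b : List (List String)) (r k : Nat),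
      pvValid ws (b.map List.length) r k →
      pvWriteA ws (b.map List.reverse) r k = (pvWriteB ws b r k).map List.reverse := by
  induction ws with
  | nil => intro b r k _; rfl
  | cons ch ws ih =>
    intro b r k hv
    simp only [pvValid, List.getElem?_map] at hv
    cases hb : b[r]? with
    | none => rw [hb] at hv; exact absurd hv (by simp)
    | some row =>
      rw [hb] at hv
      simp only [Option.map_some] at hv
      obtain ⟨hk, hv'⟩ := hv
      simp only [pvWriteA, pvWriteB, List.getElem?_map, hb, Option.map_some, Option.getD_some]
      have hset : (b.map List.reverse).set r
            (row.reverse.set k (PySem.Str.upper (String.singleton ch)))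
          = (b.set r (row.set (row.length - 1 - k)
              (PySem.Str.upper (String.singleton ch)))).map List.reverse := by
        rw [List.map_set]
        congr 1
        rw [pvReverse_set _ _ _ (by omega)]
        congr 1
        omega
      rw [hset, ih]
      have hlen : ((b.set r (row.set (row.length - 1 - k)
            (PySem.Str.upper (String.singleton ch)))).map List.length) = b.map List.length := by
        rw [List.map_set]
        simp only [List.length_set]
        apply List.ext_getElem?
        intro j
        rw [List.getElem?_set]
        by_cases hjr : r = j
        · subst hjr
          by_cases hrl : r < b.length
          · rw [if_pos rfl, if_pos (by simpa using hrl)]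
            simp [List.getElem?_map, hb]
          · rw [if_pos rfl, if_neg (by simpa using hrl)]
            symm
            rw [List.getElem?_eq_none_iff]
            simp
            omega
        · rw [if_neg hjr]
      rw [hlen]
      exact hv'

-- one scan cell: A's body on the reversed board is the reversal of B's body
theorem pvStepA_rev (w : List Char) (b : List (List String)) (row col : Nat) :
    pvStepA w (b.map List.reverse) row col
      = (if pvWalkB w b row col then pvWriteB w b row col else b).map List.reverse := by
  cases w with
  | nil => simp [pvStepA, pvWalkB, pvWriteB]
  | cons ch ws =>
    simp only [pvStepA, List.getElem?_map]
    cases hb : b[row]? with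
    | none =>
      have : pvWalkB (ch :: ws) b row col = false := by simp [pvWalkB, hb]
      simp [this]
    | some rowL =>
      simp only [Option.map_some, Option.bind_some]
      by_cases hcol : col < rowL.length
      · rw [List.getElem?_reverse hcol]
        have hct : ((rowL.length : Int) - 1 - (col : Int)).toNat = rowL.length - 1 - col := by omega
        cases hcell : rowL[rowL.length - 1 - col]? with
        | none =>
          exfalso
          rw [List.getElem?_eq_none_iff] at hcell
          omega
        | some cell =>
          dsimp only
          by_cases hw : pvWalkB (ch :: ws) b row col = true
          · -- walk succeeds: seed passes (step-0 test), write sides agree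
            have hm : pvMatch ch cell = true := by
              simp only [pvWalkB, hb] at hw
              rw [if_neg (by omega), hct, hcell] at hw
              dsimp only at hw
              by_cases hm' : pvMatch ch cell = true
              · exact hm'
              · rw [if_neg hm'] at hw; exact absurd hw (by simp)
            rw [if_pos (pvMatch_imp_seed ch cell hm), pvWalkA_rev, hw, if_pos rfl, if_pos rfl]
            exact pvWriteA_rev _ _ _ _ (pvWalkB_valid _ _ _ _ hw)
          · have hw' : pvWalkB (ch :: ws) b row col = false := Bool.eq_false_iff.mpr hw
            rw [pvWalkA_rev, hw']
            simp
      · have h1 : rowL.reverse[col]? = none := by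
          rw [List.getElem?_eq_none_iff]
          simp only [List.length_reverse]
          omega
        have hw : pvWalkB (ch :: ws) b row col = false := by
          simp only [pvWalkB, hb]
          rw [if_pos (by omega)]
        simp [h1, hw]

-- the inner column fold commutes with reversal
theorem pvInnerFold_rev (w : List Char) (row : Nat) (cols : List Nat) :
    ∀ (b : List (List String)),
      cols.foldl (fun b' col => pvStepA w b' row col) (b.map List.reverse)
        = (cols.foldl (fun b' j => if pvWalkB w b' row j then pvWriteB w b' row j else b') b).map
            List.reverse := by
  induction cols with
  | nil => intro b; rfl
  | cons c cs ih =>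
    intro b
    simp only [List.foldl_cons]
    rw [pvStepA_rev, ih]

-- the outer row fold commutes with reversal
theorem pvOuterFold_rev (w : List Char) (rows : List Nat) :
    ∀ (b : List (List String)),
      rows.foldl
          (fun b' row =>
            (List.range ((b'[row]?).getD []).length).foldl
              (fun b'' col => pvStepA w b'' row col) b')
          (b.map List.reverse)
        = (rows.foldl
            (fun b' row =>
              (List.range ((b'[row]?).getD []).length).foldl
                (fun b'' j => if pvWalkB w b'' row j then pvWriteB w b'' row j else b'') b')
            b).map List.reverse := by
  induction rows with
  | nil => intro b; rfl
  | cons r rs ih =>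
    intro b
    simp only [List.foldl_cons]
    have hlen : (((b.map List.reverse)[r]?).getD []).length = ((b[r]?).getD []).length := by
      rw [List.getElem?_map]
      cases b[r]? <;> simp
    rw [hlen, pvInnerFold_rev, ih]

-- ===== VERDICT (by name: the statement is the Claim_ definition above) =====
theorem trBL_diagonal_check_spec : Claim_equal_trBL_diagonal_check := by
  intro word board _ _
  unfold Spec_trBL_diagonal_check trBL_diagonal_check trBL_diagonal_check_alt pvDiagonalCheck
  rw [List.length_map, pvOuterFold_rev]
  simp [List.map_map]
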